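-- pv_equiv track=rewrite | github.com/Gaju27/Assignment_17_B | length_of_longest_substring_with_even_appearance.py | lenOfLongestReqSubstr
-- ===== SOURCE A (Python) =====
-- def lenOfLongestReqSubstr(s, N):
--     # Initialize unordered_map
--     ind = {}
--
--     mask = 0
--     ind[0] = -1
--
--     # Stores the length of the
--     # longest required substring
--     ans = 0
--
--     # Traverse the string
--     for i in range(N):
--
--         # Stores the value of the
--         # digit present at current
--         # index
--         val = ord(s[i]) - ord('0')
--
--         # Bitwise XOR of the mask
--         # with 1 left-shifted by val
--         mask ^= (1 << val)
--
--         # Check if the value of mask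
--         # is already present in ind
--         # or not
--         if (mask in ind):
--
--             # Update the final answer
--             ans = max(ans,
--                       i - ind[mask])
--
--         # Otherwise
--         else:
--             ind[mask] = i
--
--     # Return the answer
--     return ans
-- ===== SOURCE B (Python) =====
-- def lenOfLongestReqSubstr(s, N):
--     # Brute force: try every start, extend a running parity mask; mask == 0
--     # means every digit in s[start:end+1] appeared an even number of times.
--     ans = 0
--     for start in range(N):
--         mask = 0
--         for end in range(start, N):
--             val = ord(s[end]) - ord('0')
--             mask ^= (1 << val)
--             if mask == 0:
--                 ans = max(ans, end - start + 1)
--     return ans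
-- ===== Notes on version B (the rewrite author's own statement) =====
-- stated objective: simpler
-- what changed: Replaced A's one-pass prefix-parity-mask algorithm with a first-occurrence hash map by a plain brute force that restarts a running XOR mask at every start position and records every window whose mask is zero, removing the dictionary entirely.
import Mathlib
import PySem

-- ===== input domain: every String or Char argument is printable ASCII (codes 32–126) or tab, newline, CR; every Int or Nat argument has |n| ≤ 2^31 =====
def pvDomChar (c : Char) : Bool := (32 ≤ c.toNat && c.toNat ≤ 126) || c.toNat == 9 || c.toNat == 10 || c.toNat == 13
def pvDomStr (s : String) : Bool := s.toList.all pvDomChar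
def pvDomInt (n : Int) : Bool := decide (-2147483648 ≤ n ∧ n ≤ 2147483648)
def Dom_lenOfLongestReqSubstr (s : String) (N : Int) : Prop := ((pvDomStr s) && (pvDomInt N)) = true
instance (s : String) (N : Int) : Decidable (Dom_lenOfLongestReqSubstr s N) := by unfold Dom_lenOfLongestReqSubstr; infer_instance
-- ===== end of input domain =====

-- B replaces A's first-occurrence dict of prefix parity masks by a plain O(N^2) brute force
-- over all start positions (simpler: no dict, no first-occurrence reasoning).

-- ===== PORT A =====
-- val = ord(s[i]) - ord('0'); mask ^= 1 << val.  Prefix masks are XORs of single bits, hence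
-- nonnegative, so the port carries the mask as a Nat; `1 << val` is `1 <<< val.toNat`, exact
-- for val ≥ 0 (val < 0 raises ValueError in Python and is excluded by Pre_; out-of-range
-- indices raise IndexError and are excluded too, so the `.getD '0'` default is never used).
def pvVal (cs : List Char) (k : Nat) : Int :=
  ((((PySem.List.pyGet? cs (k : Int)).getD '0').toNat : Int)) - 48

def pvSh (cs : List Char) (k : Nat) : Nat := 1 <<< (pvVal cs k).toNat

-- the `for i in range(N)` loop of A, state (ind, mask, ans), i the current index
def pvALoop (cs : List Char) (ind : PySem.Dict Nat Int) (mask : Nat) (ans : Int)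
    (i fuel : Nat) : Int :=
  match fuel with
  | 0 => ans
  | f + 1 =>
    let mask' := mask ^^^ pvSh cs i
    match ind.get? mask' with
    | some j => pvALoop cs ind mask' (max ans ((i : Int) - j)) (i + 1) f
    | none => pvALoop cs (ind.insert mask' (i : Int)) mask' ans (i + 1) f

def lenOfLongestReqSubstr (s : String) (N : Int) : Int :=
  pvALoop s.toList ((PySem.Dict.empty : PySem.Dict Nat Int).insert 0 (-1)) 0 0 0 N.toNat

-- ===== PORT B =====
-- inner `for end in range(start, N)` loop of B
def pvBInner (cs : List Char) (start : Nat) (mask : Nat) (ans : Int) (e fuel : Nat) : Int :=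
  match fuel with
  | 0 => ans
  | f + 1 =>
    let mask' := mask ^^^ pvSh cs e
    pvBInner cs start mask'
      (if mask' = 0 then max ans ((e : Int) - (start : Int) + 1) else ans) (e + 1) f

-- outer `for start in range(N)` loop of B
def pvBOuter (cs : List Char) (n : Nat) (ans : Int) (start fuel : Nat) : Int :=
  match fuel with
  | 0 => ans
  | f + 1 => pvBOuter cs n (pvBInner cs start 0 ans start (n - start)) (start + 1) f

def lenOfLongestReqSubstr_alt (s : String) (N : Int) : Int :=
  pvBOuter s.toList N.toNat 0 0 N.toNat

-- ===== PRECONDITION & SPEC =====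
-- Pre_ excludes exactly the inputs where the Python raises: N > len(s) (IndexError at i =
-- len(s)) and a character below '0' among the first N characters (ord(c)-48 < 0, so
-- `1 << val` raises ValueError); both A and B raise there.
def Pre_lenOfLongestReqSubstr (s : String) (N : Int) : Prop :=
  N ≤ (s.toList.length : Int) ∧ (s.toList.take N.toNat).all (fun c => 48 ≤ c.toNat) = true
instance (s : String) (N : Int) : Decidable (Pre_lenOfLongestReqSubstr s N) := by
  unfold Pre_lenOfLongestReqSubstr; infer_instance

def pvWitness_lenOfLongestReqSubstr : String × Int := ("1221", 4)

def Spec_lenOfLongestReqSubstr (s : String) (N : Int) (out : Int) : Prop := out = lenOfLongestReqSubstr_alt s N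
instance (s : String) (N : Int) (out : Int) : Decidable (Spec_lenOfLongestReqSubstr s N out) := by unfold Spec_lenOfLongestReqSubstr; infer_instance

-- ===== CLAIM (what is proved, stated in full; the proofs are below) =====
def Claim_equal_lenOfLongestReqSubstr : Prop := ∀ (s : String) (N : Int), Dom_lenOfLongestReqSubstr s N → Pre_lenOfLongestReqSubstr s N → Spec_lenOfLongestReqSubstr s N (lenOfLongestReqSubstr s N)

-- ===== LEMMAS AND PROOFS =====

-- prefix parity mask after k characters
def pvPM (cs : List Char) : Nat → Nat
  | 0 => 0
  | k + 1 => pvPM cs k ^^^ pvSh cs k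

-- The common characterisation: R is the maximum of i - j over pairs j < i ≤ n with equal
-- prefix masks, with floor 0.
def pvGood (cs : List Char) (n : Nat) (R : Int) : Prop :=
  0 ≤ R ∧
  (R = 0 ∨ ∃ j i : Nat, j < i ∧ i ≤ n ∧ pvPM cs j = pvPM cs i ∧ R = (i : Int) - (j : Int)) ∧
  (∀ j i : Nat, j < i → i ≤ n → pvPM cs j = pvPM cs i → (i : Int) - (j : Int) ≤ R)

theorem pvGood_unique (cs : List Char) (n : Nat) (R R' : Int)
    (h : pvGood cs n R) (h' : pvGood cs n R') : R = R' := by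
  obtain ⟨h0, ha, hb⟩ := h
  obtain ⟨h0', ha', hb'⟩ := h'
  apply le_antisymm
  · rcases ha with rfl | ⟨j, i, hji, hin, hpm, rfl⟩
    · exact h0'
    · exact hb' j i hji hin hpm
  · rcases ha' with rfl | ⟨j, i, hji, hin, hpm, rfl⟩
    · exact h0
    · exact hb j i hji hin hpm

theorem pvALoop_good (cs : List Char) : ∀ (fuel k : Nat) (ind : PySem.Dict Nat Int) (ans : Int),
    (∀ m v, ind.get? m = some v → ∃ j, j ≤ k ∧ pvPM cs j = m ∧ v = (j : Int) - 1) →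
    (∀ j, j ≤ k → ∃ v, ind.get? (pvPM cs j) = some v ∧ v ≤ (j : Int) - 1) →
    0 ≤ ans →
    (ans = 0 ∨ ∃ j i : Nat, j < i ∧ i ≤ k ∧ pvPM cs j = pvPM cs i ∧ ans = (i : Int) - (j : Int)) →
    (∀ j i : Nat, j < i → i ≤ k → pvPM cs j = pvPM cs i → (i : Int) - (j : Int) ≤ ans) →
    pvGood cs (k + fuel) (pvALoop cs ind (pvPM cs k) ans k fuel) := by
  intro fuel
  induction fuel with
  | zero => intro k ind ans I1 I2 I3 I4 I5; exact ⟨I3, I4, I5⟩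
  | succ f ih =>
    intro k ind ans I1 I2 I3 I4 I5
    have hmask : pvPM cs k ^^^ pvSh cs k = pvPM cs (k + 1) := rfl
    cases hg : ind.get? (pvPM cs (k + 1)) with
    | some v =>
      obtain ⟨j0, hj0k, hpmj0, rfl⟩ := I1 _ _ hg
      have hkk : k + (f + 1) = (k + 1) + f := by omega
      rw [pvALoop]
      simp only [hmask, hg]
      rw [hkk]
      have hrw : max ans ((k : Int) - ((j0 : Int) - 1)) = max ans (((k + 1 : Nat) : Int) - (j0 : Int)) := by
        push_cast; ring_nf
      rw [hrw]
      apply ih (k + 1) ind _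
      · intro m v hv
        obtain ⟨j, hj, hpm, hv'⟩ := I1 _ _ hv
        exact ⟨j, by omega, hpm, hv'⟩
      · intro j hj
        rcases Nat.lt_or_ge j (k + 1) with hlt | hge
        · obtain ⟨v, hv, hle⟩ := I2 j (by omega)
          exact ⟨v, hv, hle⟩
        · have : j = k + 1 := by omega
          subst this
          exact ⟨(j0 : Int) - 1, hg, by push_cast; omega⟩
      · exact le_trans I3 (le_max_left _ _)
      · rcases max_choice ans (((k + 1 : Nat) : Int) - (j0 : Int)) with hc | hc
        · rw [hc]
          rcases I4 with rfl | ⟨j, i, hji, hik, hpm, he⟩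
          · exact Or.inl rfl
          · exact Or.inr ⟨j, i, hji, by omega, hpm, he⟩
        · rw [hc]
          exact Or.inr ⟨j0, k + 1, by omega, le_refl _, hpmj0, rfl⟩
      · intro j i hji hik hpm
        rcases Nat.lt_or_ge i (k + 1) with hlt | hge
        · exact le_trans (I5 j i hji (by omega) hpm) (le_max_left _ _)
        · have : i = k + 1 := by omega
          subst this
          obtain ⟨v, hv, hle⟩ := I2 j (by omega)
          rw [hpm, hg] at hv
          have hv' : (j0 : Int) - 1 = v := by injection hv
          have : ((k + 1 : Nat) : Int) - (j : Int) ≤ ((k + 1 : Nat) : Int) - (j0 : Int) := by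
            push_cast at *; omega
          exact le_trans this (le_max_right _ _)
    | none =>
      have hkk : k + (f + 1) = (k + 1) + f := by omega
      rw [pvALoop]
      simp only [hmask, hg]
      rw [hkk]
      apply ih (k + 1) (ind.insert (pvPM cs (k + 1)) (k : Int)) ans
      · intro m v hv
        rw [PySem.Dict.get?_insert] at hv
        split at hv
        · rename_i hm
          subst hm
          have : v = (k : Int) := by injection hv; omega
          subst this
          exact ⟨k + 1, le_refl _, rfl, by push_cast; ring⟩
        · obtain ⟨j, hj, hpm, hv'⟩ := I1 _ _ hv
          exact ⟨j, by omega, hpm, hv'⟩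
      · intro j hj
        rcases Nat.lt_or_ge j (k + 1) with hlt | hge
        · obtain ⟨v, hv, hle⟩ := I2 j (by omega)
          have hne : pvPM cs j ≠ pvPM cs (k + 1) := by
            intro he
            rw [he, hg] at hv
            simp at hv
          refine ⟨v, ?_, hle⟩
          rw [PySem.Dict.get?_insert, if_neg hne]
          exact hv
        · have : j = k + 1 := by omega
          subst this
          exact ⟨(k : Int), PySem.Dict.get?_insert_self _ _ _, by push_cast; omega⟩
      · exact I3
      · rcases I4 with rfl | ⟨j, i, hji, hik, hpm, he⟩
        · exact Or.inl rfl
        · exact Or.inr ⟨j, i, hji, by omega, hpm, he⟩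
      · intro j i hji hik hpm
        rcases Nat.lt_or_ge i (k + 1) with hlt | hge
        · exact I5 j i hji (by omega) hpm
        · have : i = k + 1 := by omega
          subst this
          obtain ⟨v, hv, _⟩ := I2 j (by omega)
          rw [hpm, hg] at hv
          simp at hv

theorem pvA_good (s : String) (N : Int) :
    pvGood s.toList N.toNat (lenOfLongestReqSubstr s N) := by
  have h := pvALoop_good s.toList N.toNat 0
    ((PySem.Dict.empty : PySem.Dict Nat Int).insert 0 (-1)) 0
    (by
      intro m v hv
      rw [PySem.Dict.get?_insert] at hv
      split at hv
      · rename_i hm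
        subst hm
        refine ⟨0, le_refl _, rfl, ?_⟩
        injection hv; omega
      · rw [PySem.Dict.get?_empty] at hv
        simp at hv)
    (by
      intro j hj
      have : j = 0 := by omega
      subst this
      exact ⟨-1, PySem.Dict.get?_insert_self _ _ _, by omega⟩)
    (le_refl 0)
    (Or.inl rfl)
    (by intro j i hji hik hpm; omega)
  simpa [lenOfLongestReqSubstr] using h

theorem pvBInner_spec (cs : List Char) : ∀ (fuel start e : Nat) (ans : Int),
    ans ≤ pvBInner cs start (pvPM cs e ^^^ pvPM cs start) ans e fuel ∧
    (pvBInner cs start (pvPM cs e ^^^ pvPM cs start) ans e fuel = ans ∨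
      ∃ i : Nat, e < i ∧ i ≤ e + fuel ∧ pvPM cs i = pvPM cs start ∧
        pvBInner cs start (pvPM cs e ^^^ pvPM cs start) ans e fuel = (i : Int) - (start : Int)) ∧
    (∀ i : Nat, e < i → i ≤ e + fuel → pvPM cs i = pvPM cs start →
      (i : Int) - (start : Int) ≤ pvBInner cs start (pvPM cs e ^^^ pvPM cs start) ans e fuel) := by
  intro fuel
  induction fuel with
  | zero =>
    intro start e ans
    refine ⟨le_refl _, Or.inl rfl, ?_⟩
    intro i h1 h2
    omega
  | succ f ih =>
    intro start e ans
    have hmask : (pvPM cs e ^^^ pvPM cs start) ^^^ pvSh cs e = pvPM cs (e + 1) ^^^ pvPM cs start := by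
      show (pvPM cs e ^^^ pvPM cs start) ^^^ pvSh cs e = (pvPM cs e ^^^ pvSh cs e) ^^^ pvPM cs start
      rw [Nat.xor_assoc, Nat.xor_assoc, Nat.xor_comm (pvPM cs start)]
    have hzero : (pvPM cs (e + 1) ^^^ pvPM cs start = 0) ↔ pvPM cs (e + 1) = pvPM cs start :=
      Nat.xor_eq_zero_iff
    rw [pvBInner]
    simp only [hmask]
    set ans' := if pvPM cs (e + 1) ^^^ pvPM cs start = 0 then
        max ans ((e : Int) - (start : Int) + 1) else ans with hans'
    have hle : ans ≤ ans' := by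
      rw [hans']; split
      · exact le_max_left _ _
      · exact le_refl _
    obtain ⟨ih1, ih2, ih3⟩ := ih start (e + 1) ans'
    refine ⟨le_trans hle ih1, ?_, ?_⟩
    · rcases ih2 with heq | ⟨i, h1, h2, h3, h4⟩
      · rw [heq, hans']
        split
        · rename_i hz
          rcases max_choice ans ((e : Int) - (start : Int) + 1) with hc | hc
          · rw [hc]; exact Or.inl rfl
          · rw [hc]
            refine Or.inr ⟨e + 1, by omega, by omega, hzero.mp hz, by push_cast; ring⟩
        · exact Or.inl rfl
      · exact Or.inr ⟨i, by omega, by omega, h3, h4⟩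
    · intro i h1 h2 h3
      rcases Nat.lt_or_ge (e + 1) i with hlt | hge
      · exact ih3 i hlt (by omega) h3
      · have : i = e + 1 := by omega
        subst this
        have hz : pvPM cs (e + 1) ^^^ pvPM cs start = 0 := hzero.mpr h3
        have : (↑(e + 1) : Int) - (start : Int) ≤ ans' := by
          rw [hans', if_pos hz]
          have := le_max_right ans ((e : Int) - (start : Int) + 1)
          push_cast
          omega
        exact le_trans this ih1

theorem pvBOuter_good (cs : List Char) (n : Nat) : ∀ (fuel start : Nat) (ans : Int),
    start + fuel = n →
    0 ≤ ans →
    (ans = 0 ∨ ∃ j i : Nat, j < i ∧ i ≤ n ∧ pvPM cs j = pvPM cs i ∧ ans = (i : Int) - (j : Int)) →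
    (∀ j i : Nat, j < start → j < i → i ≤ n → pvPM cs j = pvPM cs i → (i : Int) - (j : Int) ≤ ans) →
    pvGood cs n (pvBOuter cs n ans start fuel) := by
  intro fuel
  induction fuel with
  | zero =>
    intro start ans hsf I3 I4 I5
    refine ⟨I3, I4, ?_⟩
    intro j i hji hin hpm
    exact I5 j i (by omega) hji hin hpm
  | succ f ih =>
    intro start ans hsf I3 I4 I5
    rw [pvBOuter]
    have hstart : (0 : Nat) = pvPM cs start ^^^ pvPM cs start := (Nat.xor_self _).symm
    rw [hstart]
    obtain ⟨h1, h2, h3⟩ := pvBInner_spec cs (n - start) start start ans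
    have hsn : start + (n - start) = n := by omega
    rw [hsn] at h2 h3
    apply ih (start + 1) _ (by omega)
    · exact le_trans I3 h1
    · rcases h2 with heq | ⟨i, hi1, hi2, hi3, hi4⟩
      · rw [heq]; exact I4
      · exact Or.inr ⟨start, i, hi1, hi2, hi3.symm, hi4⟩
    · intro j i hjs hji hin hpm
      rcases Nat.lt_or_ge j start with hlt | hge
      · exact le_trans (I5 j i hlt hji hin hpm) h1
      · have : j = start := by omega
        subst this
        exact h3 i hji hin hpm.symm

theorem pvB_good (s : String) (N : Int) :
    pvGood s.toList N.toNat (lenOfLongestReqSubstr_alt s N) := by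
  have h := pvBOuter_good s.toList N.toNat N.toNat 0 0 (by omega) (le_refl 0) (Or.inl rfl)
    (by intro j i hj; omega)
  simpa [lenOfLongestReqSubstr_alt] using h

-- ===== VERDICT (by name: the statement is the Claim_ definition above) =====
theorem lenOfLongestReqSubstr_spec : Claim_equal_lenOfLongestReqSubstr := by
  intro s N _ _
  exact pvGood_unique s.toList N.toNat _ _ (pvA_good s N) (pvB_good s N)
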